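-- pv_equiv track=rewrite | github.com/dhuruvah-apps/ndastro-api | ndastro_api/services/vimsottari_dasa.py | get_dasa_sequence_from_planet
-- ===== SOURCE A (Python) =====
-- PLANET_COUNT = 9
--
-- DASA_YEARS = {
--     "sun": 6,
--     "moon": 10,
--     "mars": 7,
--     "mercury": 17,
--     "jupiter": 16,
--     "venus": 20,
--     "saturn": 19,
--     "rahu": 18,
--     "kethu": 7,
-- }
--
-- DASA_SEQUENCE = ["sun", "moon", "mars", "mercury", "jupiter", "venus", "saturn", "rahu", "kethu"]
--
-- def get_dasa_sequence_from_planet(planet: str, levels: int = 1) -> list[tuple[str, float]]: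
--     """Get dasa sequence starting from a given planet.
--
--     Args:
--         planet: Starting planet name
--         levels: How many planets in sequence to return (1-9)
--
--     Returns:
--         List of (planet, years) tuples in dasa sequence
--
--     """
--     if planet not in DASA_SEQUENCE:
--         return []
--
--     start_idx = DASA_SEQUENCE.index(planet)
--     sequence = []
--
--     for i in range(min(levels, PLANET_COUNT)):
--         idx = (start_idx + i) % PLANET_COUNT
--         p = DASA_SEQUENCE[idx]
--         sequence.append((p, DASA_YEARS[p]))
--
--     return sequence
-- ===== SOURCE B (Python) =====
-- PLANET_COUNT = 9
--
-- DASA_YEARS = {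
--     "sun": 6,
--     "moon": 10,
--     "mars": 7,
--     "mercury": 17,
--     "jupiter": 16,
--     "venus": 20,
--     "saturn": 19,
--     "rahu": 18,
--     "kethu": 7,
-- }
--
-- DASA_SEQUENCE = ["sun", "moon", "mars", "mercury", "jupiter", "venus", "saturn", "rahu", "kethu"]
--
-- # Successor map: each planet points at the next one in the (cyclic) dasa order.
-- DASA_NEXT = dict(zip(DASA_SEQUENCE, DASA_SEQUENCE[1:] + DASA_SEQUENCE[:1]))
--
-- def get_dasa_sequence_from_planet(planet: str, levels: int = 1) -> list[tuple[str, float]]: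
--     """Walk the successor chain recursively: no index arithmetic at all."""
--     if planet not in DASA_NEXT:
--         return []
--
--     def walk(p, n):
--         if n <= 0:
--             return []
--         return [(p, DASA_YEARS[p])] + walk(DASA_NEXT[p], n - 1)
--
--     return walk(planet, min(levels, PLANET_COUNT))
-- ===== Notes on version B (the rewrite author's own statement) =====
-- stated objective: alternative
-- what changed: Replaces A's start-index lookup and modular-index loop with a precomputed successor dictionary (planet -> next planet) and a recursive walk along that chain, so B never computes an index at all.
import Mathlib
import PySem

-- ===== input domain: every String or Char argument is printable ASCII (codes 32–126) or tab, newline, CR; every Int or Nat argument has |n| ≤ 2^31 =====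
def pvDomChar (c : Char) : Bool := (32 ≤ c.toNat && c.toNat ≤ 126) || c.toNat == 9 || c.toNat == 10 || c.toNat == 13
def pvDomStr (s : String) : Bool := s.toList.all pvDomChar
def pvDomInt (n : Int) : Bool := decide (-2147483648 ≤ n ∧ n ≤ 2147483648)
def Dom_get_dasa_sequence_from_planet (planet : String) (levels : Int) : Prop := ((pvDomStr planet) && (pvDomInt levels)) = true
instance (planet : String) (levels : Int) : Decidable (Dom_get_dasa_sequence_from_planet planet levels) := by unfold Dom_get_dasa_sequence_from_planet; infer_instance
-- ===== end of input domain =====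

-- B replaces A's start-index lookup and modular-index loop by a precomputed successor
-- dictionary (planet -> next planet) walked recursively; objective: alternative.

-- shared module constants (DASA_SEQUENCE / DASA_YEARS / PLANET_COUNT = 9)
def pvDasaSeq : List String :=
  ["sun", "moon", "mars", "mercury", "jupiter", "venus", "saturn", "rahu", "kethu"]

def pvDasaYears : PySem.Dict String Int :=
  PySem.Dict.ofList [("sun", 6), ("moon", 10), ("mars", 7), ("mercury", 17),
    ("jupiter", 16), ("venus", 20), ("saturn", 19), ("rahu", 18), ("kethu", 7)]

-- ===== PORT A =====
def get_dasa_sequence_from_planet (planet : String) (levels : Int) : List (String × Int) :=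
  if planet ∉ pvDasaSeq then []
  else
    match PySem.List.index? pvDasaSeq planet with
    | none => []          -- unreachable: planet ∈ pvDasaSeq
    | some start_idx =>
      (PySem.List.pyRange 0 (min levels 9) 1).foldl (fun seq i =>
        let idx := PySem.Int.mod ((start_idx : Int) + i) 9
        match PySem.List.pyGet? pvDasaSeq idx with
        | none => seq     -- unreachable: 0 ≤ idx < 9 = len(DASA_SEQUENCE)
        | some p => seq ++ [(p, pvDasaYears.getD p 0)]) []
        -- DASA_YEARS[p]: p is always a key of DASA_YEARS, so getD's default is never used

-- ===== PORT B =====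
-- DASA_NEXT = dict(zip(DASA_SEQUENCE, DASA_SEQUENCE[1:] + DASA_SEQUENCE[:1]))
def pvDasaNext : PySem.Dict String String :=
  PySem.Dict.ofList (List.zip pvDasaSeq
    (PySem.List.slice pvDasaSeq (some 1) none ++ PySem.List.slice pvDasaSeq none (some 1)))

-- walk(p, n): Python's int counter n is ported as Nat fuel — exact, since the
-- 'if n <= 0: return []' base case coincides with fuel 0 via Int.toNat at the call site.
def pvWalk : String → Nat → List (String × Int)
  | _, 0 => []
  | p, Nat.succ n =>
      (p, pvDasaYears.getD p 0) :: pvWalk (pvDasaNext.getD p "") n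
      -- DASA_YEARS[p] / DASA_NEXT[p]: p is always a key of both, so the defaults are never used

def get_dasa_sequence_from_planet_alt (planet : String) (levels : Int) : List (String × Int) :=
  match PySem.Dict.get? pvDasaNext planet with
  | none => []            -- the 'planet not in DASA_NEXT' branch
  | some _ => pvWalk planet (min levels 9).toNat

-- ===== PRECONDITION & SPEC =====
def Spec_get_dasa_sequence_from_planet (planet : String) (levels : Int) (out : List (String × Int)) : Prop := out = get_dasa_sequence_from_planet_alt planet levels
instance (planet : String) (levels : Int) (out : List (String × Int)) : Decidable (Spec_get_dasa_sequence_from_planet planet levels out) := by unfold Spec_get_dasa_sequence_from_planet; infer_instance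

-- ===== CLAIM (what is proved, stated in full; the proofs are below) =====
def Claim_equal_get_dasa_sequence_from_planet : Prop := ∀ (planet : String) (levels : Int), Dom_get_dasa_sequence_from_planet planet levels → Spec_get_dasa_sequence_from_planet planet levels (get_dasa_sequence_from_planet planet levels)

-- ===== LEMMAS AND PROOFS =====

-- For a member planet and a clamped level 0 ≤ c ≤ 9 the two ports agree: finite check.
theorem pv_fin : ∀ p ∈ pvDasaSeq, ∀ c ∈ PySem.List.pyRange 0 10 1,
    get_dasa_sequence_from_planet p c = get_dasa_sequence_from_planet_alt p c := by decide

-- A's value depends on levels only through the range stop min levels 9, which the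
-- clamp c = max 0 (min levels 9) preserves (a negative stop already gives the empty range).
theorem pv_A_clamp (planet : String) (levels : Int) :
    get_dasa_sequence_from_planet planet levels
      = get_dasa_sequence_from_planet planet (max 0 (min levels 9)) := by
  simp only [get_dasa_sequence_from_planet]
  have h1 : min (max 0 (min levels 9)) 9 = max 0 (min levels 9) := by omega
  rw [h1]
  by_cases h : min levels 9 ≤ 0
  · rw [PySem.List.pyRange_one_eq_nil h, PySem.List.pyRange_one_eq_nil (by omega)]
  · rw [show max 0 (min levels 9) = min levels 9 from by omega]

-- B's fuel (min levels 9).toNat is unchanged by the same clamp.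
theorem pv_B_clamp (planet : String) (levels : Int) :
    get_dasa_sequence_from_planet_alt planet levels
      = get_dasa_sequence_from_planet_alt planet (max 0 (min levels 9)) := by
  simp only [get_dasa_sequence_from_planet_alt]
  have h : (min (max 0 (min levels 9)) 9).toNat = (min levels 9).toNat := by omega
  rw [h]

-- Planets outside the sequence are not keys of the successor dict.
theorem pv_not_key (planet : String) (hm : planet ∉ pvDasaSeq) :
    PySem.Dict.get? pvDasaNext planet = none := by
  rw [PySem.Dict.get?_eq_none_iff_not_mem_keys]
  have hk : PySem.Dict.keys pvDasaNext = pvDasaSeq := by decide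
  rw [hk]; exact hm

-- ===== VERDICT (by name: the statement is the Claim_ definition above) =====
theorem get_dasa_sequence_from_planet_spec : Claim_equal_get_dasa_sequence_from_planet := by
  intro planet levels _
  unfold Spec_get_dasa_sequence_from_planet
  by_cases hm : planet ∈ pvDasaSeq
  · have hc : max 0 (min levels 9) ∈ PySem.List.pyRange 0 10 1 :=
      (PySem.List.mem_pyRange_one).mpr ⟨by omega, by omega⟩
    rw [pv_A_clamp, pv_B_clamp]
    exact pv_fin planet hm _ hc
  · simp only [get_dasa_sequence_from_planet, get_dasa_sequence_from_planet_alt, hm,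
      not_false_iff, if_pos, pv_not_key planet hm]
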